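-- pv_equiv track=rewrite | github.com/biocypher/karenina | src/karenina/integrations/adele/parser.py | _parse_level_content
-- ===== SOURCE A (Python) =====
-- def _parse_level_content(first_line_desc: str, continuation: str) -> tuple[str, list[str]]:
--     """Parse level content into description and examples.
--
--     Args:
--         first_line_desc: Description text from the level header line
--         continuation: Remaining content after the level header line
--
--     Returns:
--         Tuple of (full_description, list_of_examples)
--     """
--     if not continuation:
--         return first_line_desc, []
--
--     lines = continuation.split("\n")
--     description_parts = [first_line_desc] if first_line_desc else []
--     examples: list[str] = []
--     in_examples = False
--     current_example_lines: list[str] = []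
--
--     for line in lines:
--         stripped = line.strip()
--
--         if not stripped:
--             # Empty line - might end current example if in examples section
--             if current_example_lines:
--                 examples.append(" ".join(current_example_lines))
--                 current_example_lines = []
--             continue
--
--         # Check if this line starts an example (bullet point)
--         if stripped.startswith("* "):
--             in_examples = True
--             # Save previous example if exists
--             if current_example_lines:
--                 examples.append(" ".join(current_example_lines))
--                 current_example_lines = []
--             # Start new example (remove the "* " prefix)
--             current_example_lines = [stripped[2:]]
--         elif stripped == "Examples:":
--             # Explicit examples marker, switch to examples mode
--             in_examples = True
--         elif in_examples:
--             # Continuation of current example (multi-line example)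
--             if current_example_lines:
--                 current_example_lines.append(stripped)
--             else:
--                 # Orphan continuation line, treat as new example
--                 current_example_lines = [stripped]
--         else:
--             # Still in description section
--             description_parts.append(stripped)
--
--     # Don't forget last example
--     if current_example_lines:
--         examples.append(" ".join(current_example_lines))
--
--     full_description = " ".join(description_parts)
--     return full_description, examples
-- ===== SOURCE B (Python) =====
-- def _parse_level_content(first_line_desc: str, continuation: str) -> tuple[str, list[str]]:
--     """Two-phase parse: find the boundary where examples start, then join
--     description lines before it and group example lines after it."""
--     if not continuation:
--         return first_line_desc, []
--     lines = [ln.strip() for ln in continuation.split("\n")]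
--     n = len(lines)
--     b = 0
--     while b < n and not (lines[b].startswith("* ") or lines[b] == "Examples:"):
--         b += 1
--     desc_parts = ([first_line_desc] if first_line_desc else []) + [s for s in lines[:b] if s]
--     examples = []
--     cur = []
--     for s in lines[b:]:
--         if not s:
--             if cur:
--                 examples.append(" ".join(cur))
--                 cur = []
--         elif s.startswith("* "):
--             if cur:
--                 examples.append(" ".join(cur))
--             cur = [s[2:]]
--         elif s != "Examples:":
--             cur.append(s)
--     if cur:
--         examples.append(" ".join(cur))
--     return " ".join(desc_parts), examples
-- ===== Notes on version B (the rewrite author's own statement) =====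
-- stated objective: simpler
-- what changed: Replaces A's single-pass state machine with an in_examples flag by a two-phase decomposition: a boundary scan that splits the lines into description prefix and example region (description built by a filter over the prefix), then a flagless grouping pass over the example region.
import Mathlib
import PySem

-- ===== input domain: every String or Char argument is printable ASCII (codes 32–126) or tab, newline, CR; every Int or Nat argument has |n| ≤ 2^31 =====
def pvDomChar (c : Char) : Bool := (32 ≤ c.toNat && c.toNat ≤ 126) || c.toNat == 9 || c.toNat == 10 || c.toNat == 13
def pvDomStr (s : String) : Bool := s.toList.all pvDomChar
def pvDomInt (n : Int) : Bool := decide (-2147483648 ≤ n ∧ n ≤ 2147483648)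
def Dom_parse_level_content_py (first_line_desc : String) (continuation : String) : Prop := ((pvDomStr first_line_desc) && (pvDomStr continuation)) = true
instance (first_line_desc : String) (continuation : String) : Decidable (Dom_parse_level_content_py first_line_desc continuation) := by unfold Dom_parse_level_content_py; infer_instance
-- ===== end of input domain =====

-- B restructures A's single state-machine loop into two phases: a boundary scan separating
-- the description lines from the example region, then a grouping pass without the
-- in_examples flag (objective: simpler decomposition, same cost).

-- ===== PORT A =====
-- A's loop body: state (description_parts, examples, in_examples, current_example_lines).
-- continuation.split("\n") is ported as PySem.Str.split?; the separator "\n" is nonempty so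
-- split? is always `some` and `.getD []` is exact.
def pvStepA (st : List String × List String × Bool × List String) (line : String) :
    List String × List String × Bool × List String :=
  match st with
  | (dparts, examples, inEx, cur) =>
    let stripped := PySem.Str.strip line
    if stripped == "" then
      if cur ≠ [] then (dparts, examples ++ [PySem.Str.join " " cur], inEx, [])
      else (dparts, examples, inEx, cur)
    else if PySem.Str.startswith stripped "* " then
      let examples' := if cur ≠ [] then examples ++ [PySem.Str.join " " cur] else examples
      (dparts, examples', true, [PySem.Str.slice stripped (some 2) none])
    else if stripped == "Examples:" then
      (dparts, examples, true, cur)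
    else if inEx then
      (dparts, examples, inEx, if cur ≠ [] then cur ++ [stripped] else [stripped])
    else
      (dparts ++ [stripped], examples, inEx, cur)

def parse_level_content_py (first_line_desc : String) (continuation : String) : String × List String :=
  if continuation == "" then (first_line_desc, [])
  else
    let lines := (PySem.Str.split? continuation "\n").getD []
    let dparts0 : List String := if first_line_desc ≠ "" then [first_line_desc] else []
    match lines.foldl pvStepA (dparts0, [], false, []) with
    | (dparts, examples, _, cur) =>
      let examples' := if cur ≠ [] then examples ++ [PySem.Str.join " " cur] else examples
      (PySem.Str.join " " dparts, examples')

-- ===== PORT B =====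
-- is this (already stripped) line the start of the example region?
def pvIsB (s : String) : Bool := PySem.Str.startswith s "* " || s == "Examples:"

-- B's while loop: index of the first boundary line
def pvFindB (lines : List String) : Nat :=
  match lines with
  | [] => 0
  | s :: rest => if pvIsB s then 0 else 1 + pvFindB rest

-- B's grouping loop over the example region: state (examples, cur)
def pvStepB (st : List String × List String) (s : String) : List String × List String :=
  match st with
  | (examples, cur) =>
    if s == "" then
      if cur ≠ [] then (examples ++ [PySem.Str.join " " cur], []) else (examples, cur)
    else if PySem.Str.startswith s "* " then
      ((if cur ≠ [] then examples ++ [PySem.Str.join " " cur] else examples),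
       [PySem.Str.slice s (some 2) none])
    else if s ≠ "Examples:" then (examples, cur ++ [s])
    else (examples, cur)

def parse_level_content_py_alt (first_line_desc : String) (continuation : String) : String × List String :=
  if continuation == "" then (first_line_desc, [])
  else
    let lines := ((PySem.Str.split? continuation "\n").getD []).map PySem.Str.strip
    let b := pvFindB lines
    let descParts := (if first_line_desc ≠ "" then [first_line_desc] else [])
        ++ (lines.take b).filter (fun s => s ≠ "")
    match (lines.drop b).foldl pvStepB ([], []) with
    | (examples, cur) =>
      let examples' := if cur ≠ [] then examples ++ [PySem.Str.join " " cur] else examples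
      (PySem.Str.join " " descParts, examples')

-- ===== PRECONDITION & SPEC =====
def Spec_parse_level_content_py (first_line_desc : String) (continuation : String) (out : String × List String) : Prop := out = parse_level_content_py_alt first_line_desc continuation
instance (first_line_desc : String) (continuation : String) (out : String × List String) : Decidable (Spec_parse_level_content_py first_line_desc continuation out) := by unfold Spec_parse_level_content_py; infer_instance

-- ===== CLAIM (what is proved, stated in full; the proofs are below) =====
def Claim_equal_parse_level_content_py : Prop := ∀ (first_line_desc : String) (continuation : String), Dom_parse_level_content_py first_line_desc continuation → Spec_parse_level_content_py first_line_desc continuation (parse_level_content_py first_line_desc continuation)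

-- ===== LEMMAS AND PROOFS =====

-- A's step with the strip factored out of the body
def pvStepA' (st : List String × List String × Bool × List String) (s : String) :
    List String × List String × Bool × List String :=
  match st with
  | (dparts, examples, inEx, cur) =>
    if s == "" then
      if cur ≠ [] then (dparts, examples ++ [PySem.Str.join " " cur], inEx, [])
      else (dparts, examples, inEx, cur)
    else if PySem.Str.startswith s "* " then
      let examples' := if cur ≠ [] then examples ++ [PySem.Str.join " " cur] else examples
      (dparts, examples', true, [PySem.Str.slice s (some 2) none])
    else if s == "Examples:" then
      (dparts, examples, true, cur)
    else if inEx then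
      (dparts, examples, inEx, if cur ≠ [] then cur ++ [s] else [s])
    else
      (dparts ++ [s], examples, inEx, cur)

theorem pvStepA_eq (st : List String × List String × Bool × List String) (line : String) :
    pvStepA st line = pvStepA' st (PySem.Str.strip line) := by
  obtain ⟨d, e, f, c⟩ := st; rfl

theorem pvFoldA_map_strip (lines : List String) (st : List String × List String × Bool × List String) :
    lines.foldl pvStepA st = (lines.map PySem.Str.strip).foldl pvStepA' st := by
  rw [List.foldl_map]
  exact List.foldl_ext _ _ st (fun b a _ => pvStepA_eq b a)

-- boundary lines are not blank
theorem pvIsB_ne_empty {s : String} (h : pvIsB s = true) : (s == "") = false := by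
  cases hb : (s == "") with
  | false => rfl
  | true =>
    have hs : s = "" := eq_of_beq hb
    subst hs
    exact absurd h (by decide)

-- prefix phase: before any boundary line, A only accumulates nonblank lines into dparts
theorem pvFoldA_prefix (L : List String) (hL : ∀ s ∈ L, pvIsB s = false)
    (d ex : List String) :
    L.foldl pvStepA' (d, ex, false, []) = (d ++ L.filter (fun s => s ≠ ""), ex, false, []) := by
  induction L generalizing d with
  | nil => simp
  | cons s rest ih =>
    have hs : pvIsB s = false := hL s (by simp)
    have hrest : ∀ t ∈ rest, pvIsB t = false := fun t ht => hL t (by simp [ht])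
    simp only [pvIsB, Bool.or_eq_false_iff] at hs
    by_cases hblank : s = ""
    · subst hblank
      simp only [List.foldl_cons, pvStepA']
      simp [ih hrest d]
    · have hne : s ≠ "Examples:" := fun h => by simp [h] at hs
      have hstar : PySem.Chars.startswith s.toList ['*', ' '] = false := by simpa using hs.1
      rw [List.foldl_cons]
      have hstep : pvStepA' (d, ex, false, []) s = (d ++ [s], ex, false, []) := by
        simp [pvStepA', hblank, hstar, hne]
      rw [hstep, ih hrest (d ++ [s])]
      simp [hblank]

-- example phase: once in_examples is true, A's step is B's step (dparts and the flag frozen)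
theorem pvStepA'_true (d ex cur : List String) (s : String) :
    pvStepA' (d, ex, true, cur) s =
      (d, (pvStepB (ex, cur) s).1, true, (pvStepB (ex, cur) s).2) := by
  simp only [pvStepA', pvStepB]
  by_cases hblank : (s == "") = true
  · by_cases hcur : cur = [] <;> simp [hblank, hcur]
  · by_cases hstar : PySem.Chars.startswith s.toList ['*', ' '] = true
    · simp [hblank, hstar]
    · by_cases hex : s = "Examples:"
      · subst hex
        have h0 : PySem.Chars.startswith ['E','x','a','m','p','l','e','s',':'] ['*', ' '] = false := by decide
        simp [h0]
      · cases cur <;> simp [hblank, hstar, hex]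

theorem pvFoldA_suffix (L : List String) (d ex cur : List String) :
    L.foldl pvStepA' (d, ex, true, cur) =
      (d, (L.foldl pvStepB (ex, cur)).1, true, (L.foldl pvStepB (ex, cur)).2) := by
  induction L generalizing ex cur with
  | nil => rfl
  | cons s rest ih =>
    simp only [List.foldl_cons, pvStepA'_true]
    rw [ih]

-- the boundary transition itself: A's step on the first boundary line, from the prefix state
theorem pvStepA'_boundary (d ex : List String) {s : String} (hs : pvIsB s = true) :
    pvStepA' (d, ex, false, []) s = (d, (pvStepB (ex, []) s).1, true, (pvStepB (ex, []) s).2) := by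
  have hblank := pvIsB_ne_empty hs
  simp only [pvIsB, Bool.or_eq_true] at hs
  simp only [pvStepA', pvStepB]
  rcases hs with hstar | hex
  · simp at hstar
    simp [hblank, hstar]
  · have hseq : s = "Examples:" := eq_of_beq hex
    subst hseq
    have h0 : PySem.Chars.startswith ['E','x','a','m','p','l','e','s',':'] ['*', ' '] = false := by decide
    simp [h0]

-- pvFindB: everything before the boundary index is a non-boundary line
theorem pvFindB_take (L : List String) : ∀ s ∈ L.take (pvFindB L), pvIsB s = false := by
  induction L with
  | nil => simp
  | cons a rest ih =>
    by_cases h : pvIsB a = true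
    · simp [pvFindB, h]
    · have h' : pvIsB a = false := by simpa using h
      simp only [pvFindB, h', Bool.false_eq_true, if_false]
      intro s hs
      rw [Nat.add_comm, List.take_succ_cons] at hs
      rcases List.mem_cons.mp hs with rfl | hmem
      · exact h'
      · exact ih s hmem

-- pvFindB: the suffix is empty or starts with a boundary line
theorem pvFindB_drop (L : List String) :
    L.drop (pvFindB L) = [] ∨
      ∃ s rest, L.drop (pvFindB L) = s :: rest ∧ pvIsB s = true := by
  induction L with
  | nil => left; rfl
  | cons a rest ih =>
    by_cases h : pvIsB a = true
    · right; exact ⟨a, rest, by simp [pvFindB, h], h⟩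
    · have h' : pvIsB a = false := by simpa using h
      simp only [pvFindB, h', Bool.false_eq_true, if_false, Nat.add_comm, List.drop_succ_cons]
      exact ih

-- ===== VERDICT (by name: the statement is the Claim_ definition above) =====
theorem parse_level_content_py_spec : Claim_equal_parse_level_content_py := by
  unfold Claim_equal_parse_level_content_py Spec_parse_level_content_py
  intro fld cont _
  unfold parse_level_content_py parse_level_content_py_alt
  by_cases hc : (cont == "") = true
  · simp only [hc, if_true]
  · simp only [Bool.not_eq_true] at hc
    simp only [hc, Bool.false_eq_true, if_false]
    set L := ((PySem.Str.split? cont "\n").getD []).map PySem.Str.strip with hLdef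
    set d0 : List String := if fld ≠ "" then [fld] else [] with hd0
    set b := pvFindB L with hb
    have hsplit : L = L.take b ++ L.drop b := (List.take_append_drop b L).symm
    have hA : L.foldl pvStepA' (d0, [], false, []) =
        (L.drop b).foldl pvStepA' (d0 ++ (L.take b).filter (fun s => s ≠ ""), [], false, []) := by
      conv_lhs => rw [hsplit]
      rw [List.foldl_append, pvFoldA_prefix (L.take b) (by rw [hb]; exact pvFindB_take L) d0 []]
    rw [pvFoldA_map_strip, ← hLdef, hA]
    rcases pvFindB_drop L with hdrop | ⟨s, rest, hdrop, hsB⟩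
    · rw [← hb] at hdrop
      rw [hdrop]
      rfl
    · rw [← hb] at hdrop
      rw [hdrop, List.foldl_cons,
          pvStepA'_boundary (d0 ++ (L.take b).filter (fun s => s ≠ "")) [] hsB,
          pvFoldA_suffix, List.foldl_cons]
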